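-- pv_equiv track=rewrite | github.com/PRKKILLER/Algorithm_Practice | Company-OA/Robinhood/maxKOccurences.py | solution
-- ===== SOURCE A (Python) =====
-- from typing import List
--
-- def solution(sequence: str, words: List[str]) -> List[int]:
--     res = []
--     l = len(sequence)
--     for w in words:
--         n = len(w)
--         start = sequence.find(w)
--         if start == -1:
--             res.append(0)
--         else:
--             cnt = 1
--             while start + n * (cnt+1) <= l:
--                 if sequence[start:start + n * (cnt+1)] == w * (cnt + 1):
--                     cnt += 1
--                 else:
--                     break
--             res.append(cnt)
--
--     return res
-- ===== SOURCE B (Python) =====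
-- from typing import List
--
-- def _count(sequence: str, w: str) -> int:
--     start = sequence.find(w)
--     if start == -1:
--         return 0
--     n = len(w)
--     cnt = 1
--     # compare only the NEXT n characters each step instead of rebuilding the whole prefix
--     while sequence[start + n * cnt : start + n * (cnt + 1)] == w:
--         cnt += 1
--     return cnt
--
-- def solution(sequence: str, words: List[str]) -> List[int]:
--     return [_count(sequence, w) for w in words]
-- ===== Notes on version B (the rewrite author's own statement) =====
-- stated objective: faster
-- what changed: Instead of rebuilding and comparing the whole prefix sequence[start:start+n*(cnt+1)] against w*(cnt+1) on every iteration, B compares only the next n characters against w each step, and the per-word work is a list comprehension over a helper.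
import Mathlib
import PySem

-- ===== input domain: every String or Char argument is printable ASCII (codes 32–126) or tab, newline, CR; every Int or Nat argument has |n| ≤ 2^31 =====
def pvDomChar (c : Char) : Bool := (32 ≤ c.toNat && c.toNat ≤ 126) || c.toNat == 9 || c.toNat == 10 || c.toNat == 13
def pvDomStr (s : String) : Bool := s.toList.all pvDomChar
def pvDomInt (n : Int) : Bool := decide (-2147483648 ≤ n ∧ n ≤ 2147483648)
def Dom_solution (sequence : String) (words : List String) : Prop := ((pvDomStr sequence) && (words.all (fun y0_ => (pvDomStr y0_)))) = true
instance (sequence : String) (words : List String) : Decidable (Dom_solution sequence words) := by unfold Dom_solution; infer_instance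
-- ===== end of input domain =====

-- B replaces A's per-step rebuild-and-compare of the whole prefix (sequence[start:start+n*(cnt+1)] == w*(cnt+1))
-- by a comparison of only the next n characters against w; objective: faster (asymptotic per word).
-- Both Pythons loop forever on an empty word, hence Pre_ excludes it.

-- ===== PORT A =====
-- w * k  (Python string repetition)
def pyStrMul (w : List Char) (k : Nat) : List Char := (List.replicate k w).flatten

-- A's while loop: while start + n*(cnt+1) <= l and the whole prefix equals w*(cnt+1), cnt += 1.
-- fuel makes the recursion structural; fuel = l+1 is never exhausted when n ≥ 1 (the only case Pre_ admits).
def loopA (s w : List Char) (l n start : Nat) (cnt : Nat) : Nat → Nat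
  | 0 => cnt
  | fuel + 1 =>
    if start + n * (cnt + 1) ≤ l then
      if PySem.List.slice s (some (start : Int)) (some ((start + n * (cnt + 1) : Nat) : Int)) = pyStrMul w (cnt + 1) then
        loopA s w l n start (cnt + 1) fuel
      else cnt
    else cnt

def solution (sequence : String) (words : List String) : List Int :=
  let s := sequence.toList
  let l := s.length
  words.foldl (fun res w' =>
    let w := w'.toList
    let n := w.length
    let start := PySem.Chars.find s w
    if start = -1 then res ++ [0]
    else res ++ [(loopA s w l n start.toNat 1 (l + 1) : Int)]) []

-- ===== PORT B =====
-- B's while loop: while the NEXT n characters equal w, cnt += 1 (Python's slice clamps, so a short tail compares unequal).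
def loopB (s w : List Char) (n start : Nat) (cnt : Nat) : Nat → Nat
  | 0 => cnt
  | fuel + 1 =>
    if PySem.List.slice s (some ((start + n * cnt : Nat) : Int)) (some ((start + n * (cnt + 1) : Nat) : Int)) = w then
      loopB s w n start (cnt + 1) fuel
    else cnt

def countB (sequence w' : String) : Int :=
  let s := sequence.toList
  let w := w'.toList
  let start := PySem.Chars.find s w
  if start = -1 then 0
  else (loopB s w w.length start.toNat 1 (s.length + 1) : Int)

def solution_alt (sequence : String) (words : List String) : List Int :=
  words.map (countB sequence)

-- ===== PRECONDITION & SPEC =====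
-- Pre_ excludes an empty word in `words`: there both A's and B's while loops never terminate (Python diverges).
def Pre_solution (sequence : String) (words : List String) : Prop := ∀ w ∈ words, w ≠ ""
instance (sequence : String) (words : List String) : Decidable (Pre_solution sequence words) := by unfold Pre_solution; infer_instance

def pvWitness_solution : String × List String := ("ababab", ["ab", "ba", "c"])

def Spec_solution (sequence : String) (words : List String) (out : List Int) : Prop := out = solution_alt sequence words
instance (sequence : String) (words : List String) (out : List Int) : Decidable (Spec_solution sequence words out) := by unfold Spec_solution; infer_instance

-- ===== CLAIM (what is proved, stated in full; the proofs are below) =====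
def Claim_equal_solution : Prop := ∀ (sequence : String) (words : List String), Dom_solution sequence words → Pre_solution sequence words → Spec_solution sequence words (solution sequence words)

-- ===== LEMMAS AND PROOFS =====

theorem pyStrMul_succ (w : List Char) (k : Nat) : pyStrMul w (k + 1) = pyStrMul w k ++ w := by
  simp [pyStrMul, List.replicate_succ']

theorem pyStrMul_one (w : List Char) : pyStrMul w 1 = w := by simp [pyStrMul]

-- the two loops agree whenever the first cnt copies of w are already known to sit at start
theorem loop_eq (s w : List Char) (n start : Nat) (hn : w.length = n) (hpos : 0 < n)
    (hstart : start ≤ s.length) :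
    ∀ fuel cnt, (s.drop start).take (n * cnt) = pyStrMul w cnt → n * cnt ≤ s.length - start →
      loopA s w s.length n start cnt fuel = loopB s w n start cnt fuel := by
  intro fuel
  induction fuel with
  | zero => intro cnt _ _; rfl
  | succ fuel ih =>
    intro cnt hinv hlen
    have hA : PySem.List.slice s (some (start : Int)) (some ((start + n * (cnt + 1) : Nat) : Int))
        = (s.drop start).take (n * (cnt + 1)) := by
      rw [show ((start + n * (cnt + 1) : Nat) : Int) = ((start : Nat) : Int) + ((n * (cnt + 1) : Nat) : Int) by push_cast; ring]
      exact PySem.List.slice_natCast_add s start (n * (cnt + 1))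
    have hB : PySem.List.slice s (some ((start + n * cnt : Nat) : Int)) (some ((start + n * (cnt + 1) : Nat) : Int))
        = ((s.drop start).drop (n * cnt)).take n := by
      rw [show ((start + n * (cnt + 1) : Nat) : Int) = ((start + n * cnt : Nat) : Int) + ((n : Nat) : Int) by push_cast; ring]
      rw [PySem.List.slice_natCast_add s (start + n * cnt) n, List.drop_drop]
    have hsplit : (s.drop start).take (n * (cnt + 1))
        = (s.drop start).take (n * cnt) ++ ((s.drop start).drop (n * cnt)).take n := by
      rw [← List.take_add]
      ring_nf
    -- the key iff between A's and B's loop conditions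
    have hiff : (start + n * (cnt + 1) ≤ s.length ∧
        (s.drop start).take (n * (cnt + 1)) = pyStrMul w (cnt + 1))
        ↔ ((s.drop start).drop (n * cnt)).take n = w := by
      constructor
      · rintro ⟨hle, heq⟩
        rw [hsplit, hinv, pyStrMul_succ] at heq
        exact List.append_cancel_left heq
      · intro heq
        have hlenw : (((s.drop start).drop (n * cnt)).take n).length = n := by rw [heq, hn]
        rw [List.length_take, List.length_drop, List.length_drop] at hlenw
        have hms : n * (cnt + 1) = n * cnt + n := Nat.mul_succ n cnt
        refine ⟨by omega, ?_⟩
        rw [hsplit, hinv, pyStrMul_succ, heq]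
    rw [loopA, loopB, hA, hB]
    by_cases hc : ((s.drop start).drop (n * cnt)).take n = w
    · have hAc := hiff.mpr hc
      rw [if_pos hAc.1, if_pos hAc.2, if_pos hc]
      exact ih (cnt + 1) hAc.2 (by omega)
    · rw [if_neg hc]
      by_cases h1 : start + n * (cnt + 1) ≤ s.length
      · rw [if_pos h1]
        have h2 : ¬ (s.drop start).take (n * (cnt + 1)) = pyStrMul w (cnt + 1) := by
          intro h2; exact hc (hiff.mp ⟨h1, h2⟩)
        rw [if_neg h2]
      · rw [if_neg h1]

theorem countB_eq (sequence w' : String) (hw : w' ≠ "") :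
    countB sequence w'
    = (if PySem.Chars.find sequence.toList w'.toList = -1 then (0 : Int)
        else (loopA sequence.toList w'.toList sequence.toList.length w'.toList.length
          (PySem.Chars.find sequence.toList w'.toList).toNat 1 (sequence.toList.length + 1) : Int)) := by
  simp only [countB]
  by_cases hf : PySem.Chars.find sequence.toList w'.toList = -1
  · rw [if_pos hf, if_pos hf]
  · rw [if_neg hf, if_neg hf]
    have hpos : 0 < w'.toList.length := by
      cases h : w'.toList with
      | nil => exact absurd (by ext1; simp [h]) hw
      | cons a l => simp
    have hge : 0 ≤ PySem.Chars.find sequence.toList w'.toList := by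
      have := PySem.Chars.neg_one_le_find sequence.toList w'.toList
      omega
    obtain ⟨hpre, -⟩ := PySem.Chars.find_spec (s := sequence.toList) (sub := w'.toList) hge
    have htake : (sequence.toList.drop (PySem.Chars.find sequence.toList w'.toList).toNat).take w'.toList.length = w'.toList :=
      (List.prefix_iff_eq_take.mp hpre).symm
    have hlenle : w'.toList.length ≤ (sequence.toList.drop (PySem.Chars.find sequence.toList w'.toList).toNat).length :=
      hpre.length_le
    have hstartle : (PySem.Chars.find sequence.toList w'.toList).toNat ≤ sequence.toList.length := by
      have := PySem.Chars.find_le_length (s := sequence.toList) (sub := w'.toList)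
      omega
    have hdlen := List.length_drop (l := sequence.toList) (i := (PySem.Chars.find sequence.toList w'.toList).toNat)
    have h1 : (sequence.toList.drop (PySem.Chars.find sequence.toList w'.toList).toNat).take (w'.toList.length * 1)
        = pyStrMul w'.toList 1 := by
      rw [pyStrMul_one, Nat.mul_one]; exact htake
    have h2 : w'.toList.length * 1 ≤ sequence.toList.length - (PySem.Chars.find sequence.toList w'.toList).toNat := by
      omega
    rw [loop_eq sequence.toList w'.toList w'.toList.length
      (PySem.Chars.find sequence.toList w'.toList).toNat rfl hpos hstartle
      (sequence.toList.length + 1) 1 h1 h2]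

theorem fold_eq_map (sequence : String) (words : List String) (hpre : ∀ w ∈ words, w ≠ "") :
    ∀ res : List Int,
      words.foldl (fun res w' =>
        if PySem.Chars.find sequence.toList w'.toList = -1 then res ++ [0]
        else res ++ [(loopA sequence.toList w'.toList sequence.toList.length w'.toList.length
          (PySem.Chars.find sequence.toList w'.toList).toNat 1 (sequence.toList.length + 1) : Int)]) res
      = res ++ words.map (countB sequence) := by
  induction words with
  | nil => intro res; simp
  | cons w ws ih =>
    intro res
    have hw : w ≠ "" := hpre w (by simp)
    have hws : ∀ x ∈ ws, x ≠ "" := fun x hx => hpre x (by simp [hx])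
    simp only [List.foldl_cons, List.map_cons]
    have hc := countB_eq sequence w hw
    by_cases hf : PySem.Chars.find sequence.toList w.toList = -1
    · rw [if_pos hf, ih hws]
      rw [if_pos hf] at hc
      simp [hc]
    · rw [if_neg hf, ih hws]
      rw [if_neg hf] at hc
      simp [hc]

-- ===== VERDICT (by name: the statement is the Claim_ definition above) =====
theorem solution_spec : Claim_equal_solution := by
  intro sequence words _ hpre
  unfold Spec_solution solution solution_alt
  simpa using fold_eq_map sequence words hpre []
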